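-- pv_equiv track=rewrite | github.com/tomleung1996/OpenSubAffil | 03_process_ner_output.py | is_monotonic_starts
-- ===== SOURCE A (Python) =====
-- from typing import Any, Iterable
--
-- def is_monotonic_starts(segment: list[dict[str, Any]]) -> bool:
--     last: int | None = None
--     for ent in segment:
--         start = ent.get("start")
--         if start is None:
--             continue
--         if last is not None and start < last:
--             return False
--         last = start
--     return True
-- ===== SOURCE B (Python) =====
-- def is_monotonic_starts(segment: list[dict[str, "Any"]]) -> bool:
--     starts = [e.get("start") for e in segment if e.get("start") is not None]
--     return starts == sorted(starts)
-- ===== Notes on version B (the rewrite author's own statement) =====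
-- stated objective: alternative
-- what changed: Instead of any adjacency/last-value comparison, B materializes the non-null starts and decides monotonicity by comparing the list with its sorted copy (starts == sorted(starts)); no element-to-element comparison appears in B's own code.
import Mathlib
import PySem

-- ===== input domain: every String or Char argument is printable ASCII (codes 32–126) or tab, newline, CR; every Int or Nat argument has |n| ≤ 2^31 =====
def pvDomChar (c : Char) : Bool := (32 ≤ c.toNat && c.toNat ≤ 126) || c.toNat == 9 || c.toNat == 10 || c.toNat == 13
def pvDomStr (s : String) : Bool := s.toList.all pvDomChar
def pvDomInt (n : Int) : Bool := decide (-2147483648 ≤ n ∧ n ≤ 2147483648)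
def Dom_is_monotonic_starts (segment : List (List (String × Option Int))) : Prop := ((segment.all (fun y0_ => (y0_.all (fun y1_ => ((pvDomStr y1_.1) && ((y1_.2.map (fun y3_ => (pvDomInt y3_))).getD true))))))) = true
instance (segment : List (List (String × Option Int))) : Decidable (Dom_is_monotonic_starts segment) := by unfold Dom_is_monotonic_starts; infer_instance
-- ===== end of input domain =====

-- B decides monotonicity by a different strategy: it materializes the non-null starts and
-- compares that list with its sorted copy (starts == sorted(starts)), instead of A's fused
-- stateful scan comparing each start with the previous one (objective: alternative).

-- ===== PORT A =====
-- ent.get("start"): first-match lookup in the association list; None if absent or stored None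
def pvGetStart (ent : List (String × Option Int)) : Option Int :=
  (ent.find? (fun kv => kv.1 == "start")).bind (fun kv => kv.2)

-- A's loop: state 'last', early return False
def isMonoGo (last : Option Int) : List (List (String × Option Int)) → Bool
  | [] => true
  | ent :: rest =>
    match pvGetStart ent with
    | none => isMonoGo last rest
    | some start =>
      match last with
      | some l => if start < l then false else isMonoGo (some start) rest
      | none => isMonoGo (some start) rest

def is_monotonic_starts (segment : List (List (String × Option Int))) : Bool :=
  isMonoGo none segment

-- ===== PORT B =====
def is_monotonic_starts_alt (segment : List (List (String × Option Int))) : Bool :=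
  let starts := segment.filterMap pvGetStart
  starts == PySem.List.sorted starts (fun x => x) false

-- ===== PRECONDITION & SPEC =====
def Spec_is_monotonic_starts (segment : List (List (String × Option Int))) (out : Bool) : Prop := out = is_monotonic_starts_alt segment
instance (segment : List (List (String × Option Int))) (out : Bool) : Decidable (Spec_is_monotonic_starts segment out) := by unfold Spec_is_monotonic_starts; infer_instance

-- ===== CLAIM (what is proved, stated in full; the proofs are below) =====
def Claim_equal_is_monotonic_starts : Prop := ∀ (segment : List (List (String × Option Int))), Dom_is_monotonic_starts segment → Spec_is_monotonic_starts segment (is_monotonic_starts segment)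

-- ===== LEMMAS AND PROOFS =====

-- A's scan, characterised: it returns true iff (last? ++ starts) is chain-nondecreasing
theorem isMonoGo_eq_chain (seg : List (List (String × Option Int))) :
    ∀ last : Option Int,
      isMonoGo last seg =
        decide ((last.toList ++ seg.filterMap pvGetStart).IsChain (· ≤ ·)) := by
  induction seg with
  | nil =>
    intro last
    cases last <;> simp [isMonoGo]
  | cons ent rest ih =>
    intro last
    cases h : pvGetStart ent with
    | none =>
      cases last <;> simp [isMonoGo, h, ih]
    | some s =>
      cases last with
      | none =>
        simp [isMonoGo, h, ih]
      | some l =>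
        simp only [isMonoGo, h, List.filterMap_cons, ih]
        by_cases hls : s < l
        · simp [hls, List.isChain_cons_cons, show ¬ l ≤ s by omega]
        · simp [hls, List.isChain_cons_cons, show l ≤ s by omega]

theorem chain_iff_sorted_eq (xs : List Int) :
    xs.IsChain (· ≤ ·) ↔ PySem.List.sorted xs (fun x => x) false = xs := by
  constructor
  · intro h
    exact PySem.List.sorted_id_eq_of_perm_of_pairwise xs xs (List.Perm.refl xs) (List.isChain_iff_pairwise.mp h)
  · intro h
    have hp := PySem.List.sorted_pairwise xs (fun x : Int => x)
    rw [h] at hp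
    exact List.isChain_iff_pairwise.mpr hp

-- ===== VERDICT (by name: the statement is the Claim_ definition above) =====
theorem is_monotonic_starts_spec : Claim_equal_is_monotonic_starts := by
  intro segment _
  unfold Spec_is_monotonic_starts is_monotonic_starts is_monotonic_starts_alt
  rw [isMonoGo_eq_chain segment none]
  simp only [Option.toList_none, List.nil_append]
  by_cases hc : (segment.filterMap pvGetStart).IsChain (· ≤ ·)
  · have heq := (chain_iff_sorted_eq _).mp hc
    simp [hc, heq]
  · have hne := (chain_iff_sorted_eq _).not.mp hc
    have hb : (List.filterMap pvGetStart segment ==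
        PySem.List.sorted (List.filterMap pvGetStart segment) (fun x => x) false) = false :=
      beq_eq_false_iff_ne.mpr (fun he => hne he.symm)
    simp [hc, hb]
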